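-- pv_equiv track=rewrite | github.com/kellymakoc/practices | prefixscores.py | getPrefixScores
-- ===== SOURCE A (Python) =====
-- def getPrefixScores(arr):
--     # Write your code here
--     ans = []
--     prev_max, curr_max = 0, 0
--
--     for i in arr:
--         curr_max += i
--         ans.append(prev_max + curr_max)
--         prev_max = ans[-1]
--
--     curr_max = 0
--     for i in range(len(arr)):
--         curr_max = max(curr_max, arr[i])
--         ans[i] += (i+1)*curr_max
--         ans[i] %= (10**9+7)
--
--
--     return ans
-- ===== SOURCE B (Python) =====
-- def getPrefixScores(arr):
--     MOD = 10 ** 9 + 7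
--     s = 0   # prefix sum  S_i = arr[0] + ... + arr[i]
--     w = 0   # weighted sum W_i = sum of j*arr[j] for j <= i
--     m = 0   # running max of arr[0..i]
--     out = []
--     for i, x in enumerate(arr):
--         s += x
--         w += i * x
--         if x > m:
--             m = x
--         # Abel's identity: sum of the prefix sums S_0+...+S_i = (i+1)*S_i - W_i,
--         # so the score is (i+1)*S_i - W_i + (i+1)*m = (i+1)*(S_i + m) - W_i.
--         out.append(((i + 1) * (s + m) - w) % MOD)
--     return out
-- ===== Notes on version B (the rewrite author's own statement) =====
-- stated objective: alternative
-- what changed: Instead of building the prefix-sum-of-prefix-sums list and then rewriting it in a second loop with the running max and modulo, B never accumulates the sum of prefix sums at all: it maintains the prefix sum S, the index-weighted sum W of j*arr[j] and the running max, and emits each score by the closed-form Abel identity (i+1)*(S+max)-W.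
import Mathlib
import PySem

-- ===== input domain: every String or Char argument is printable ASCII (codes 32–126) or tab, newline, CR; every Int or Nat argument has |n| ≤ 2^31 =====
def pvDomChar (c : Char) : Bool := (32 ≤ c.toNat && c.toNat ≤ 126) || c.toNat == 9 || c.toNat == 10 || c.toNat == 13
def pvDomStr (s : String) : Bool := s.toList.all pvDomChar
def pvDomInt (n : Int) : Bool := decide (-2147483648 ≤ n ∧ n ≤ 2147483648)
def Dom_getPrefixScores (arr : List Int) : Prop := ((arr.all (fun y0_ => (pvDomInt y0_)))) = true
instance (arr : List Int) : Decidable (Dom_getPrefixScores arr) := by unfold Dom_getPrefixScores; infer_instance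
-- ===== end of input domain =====

-- B replaces A's two-loop construction (prefix-of-prefix sums then in-place rewrite) by a closed-form
-- computation via Abel's identity (i+1)*S_i - W_i with an index-weighted running sum (alternative algorithm, same O(n)).


-- ===== PORT A =====
-- first loop: state (ans, prev_max, curr_max); 'ans[-1]' read back with pyGet? (ans' is nonempty, so Python never raises here)
def pvALoop1 : List Int → List Int → Int → Int → List Int × Int × Int
  | [], ans, prev, curr => (ans, prev, curr)
  | i :: rest, ans, prev, curr =>
    let curr' := curr + i
    let ans' := ans ++ [prev + curr']
    let prev' := (PySem.List.pyGet? ans' (-1)).getD 0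
    pvALoop1 rest ans' prev' curr'

-- second loop: for i in range(len(arr)), in-place update of ans[i]; indices are in range, so the getD defaults are never taken
def pvALoop2 (arr : List Int) : List Int → List Int → Int → List Int
  | [], ans, _ => ans
  | i :: is, ans, curr =>
    let curr' := max curr ((PySem.List.pyGet? arr i).getD 0)
    let v := (PySem.List.pyGet? ans i).getD 0 + (i + 1) * curr'
    let ans' := PySem.List.pySetD ans i (PySem.Int.mod v (10 ^ 9 + 7))
    pvALoop2 arr is ans' curr'

def getPrefixScores (arr : List Int) : List Int :=
  let r := pvALoop1 arr [] 0 0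
  pvALoop2 arr (PySem.List.pyRange 0 (arr.length : Int) 1) r.1 0

-- ===== PORT B =====
-- one pass: i = index, s = prefix sum, w = index-weighted sum of j*arr[j], m = running max;
-- the score is the closed form (i+1)*(s+m) - w
def pvBGo : List Int → Int → Int → Int → Int → List Int
  | [], _, _, _, _ => []
  | x :: xs, i, s, w, m =>
    let s' := s + x
    let w' := w + i * x
    let m' := if x > m then x else m
    PySem.Int.mod ((i + 1) * (s' + m') - w') (10 ^ 9 + 7) :: pvBGo xs (i + 1) s' w' m'

def getPrefixScores_alt (arr : List Int) : List Int := pvBGo arr 0 0 0 0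

-- ===== PRECONDITION & SPEC =====
def Spec_getPrefixScores (arr : List Int) (out : List Int) : Prop := out = getPrefixScores_alt arr
instance (arr : List Int) (out : List Int) : Decidable (Spec_getPrefixScores arr out) := by unfold Spec_getPrefixScores; infer_instance

-- ===== CLAIM (what is proved, stated in full; the proofs are below) =====
def Claim_equal_getPrefixScores : Prop := ∀ (arr : List Int), Dom_getPrefixScores arr → Spec_getPrefixScores arr (getPrefixScores arr)

-- ===== LEMMAS AND PROOFS =====

-- the list A's first loop appends: running "prefix sums of prefix sums"
def pvTList : List Int → Int → Int → List Int
  | [], _, _ => []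
  | x :: xs, prev, curr => (prev + (curr + x)) :: pvTList xs (prev + (curr + x)) (curr + x)

-- proof-only intermediate: A's two loops fused, with t accumulating the sum of prefix sums
def pvTGo : List Int → Int → Int → Int → Int → List Int
  | [], _, _, _, _ => []
  | x :: xs, i, s, t, m =>
    let s' := s + x
    let t' := t + s'
    let m' := max m x
    PySem.Int.mod (t' + (i + 1) * m') (10 ^ 9 + 7) :: pvTGo xs (i + 1) s' t' m'

theorem pvALoop1_fst (xs : List Int) : ∀ (ans : List Int) (prev curr : Int),
    (pvALoop1 xs ans prev curr).1 = ans ++ pvTList xs prev curr := by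
  induction xs with
  | nil => intro ans prev curr; simp [pvALoop1, pvTList]
  | cons x rest ih =>
    intro ans prev curr
    simp only [pvALoop1, pvTList, PySem.List.pyGet?_neg_one_append_singleton, Option.getD_some, ih]
    simp

theorem pvALoop2_key (sufA : List Int) : ∀ (preA preOut : List Int) (s t m : Int),
    preA.length = preOut.length →
    pvALoop2 (preA ++ sufA)
      (PySem.List.pyRange (preA.length : Int) ((preA.length : Int) + (sufA.length : Int)) 1)
      (preOut ++ pvTList sufA t s) m
      = preOut ++ pvTGo sufA (preA.length : Int) s t m := by
  induction sufA with
  | nil =>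
    intro preA preOut s t m _
    simp [pvTList, pvTGo, PySem.List.pyRange_one_eq_nil, pvALoop2]
  | cons x xs ih =>
    intro preA preOut s t m hlen
    have hcons : PySem.List.pyRange (preA.length : Int) ((preA.length : Int) + ((x :: xs).length : Int)) 1
        = (preA.length : Int) :: PySem.List.pyRange ((preA.length : Int) + 1) ((preA.length : Int) + ((x :: xs).length : Int)) 1 := by
      apply PySem.List.pyRange_one_cons; simp; try omega
    rw [hcons]
    simp only [pvTList, pvALoop2]
    rw [PySem.List.pyGet?_append_length]
    have hgetOut : PySem.List.pyGet? (preOut ++ (t + (s + x)) :: pvTList xs (t + (s + x)) (s + x)) (preA.length : Int)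
        = some (t + (s + x)) := by
      rw [hlen]; exact PySem.List.pyGet?_append_length _ _ _
    rw [hgetOut]
    simp only [Option.getD_some]
    have hset : PySem.List.pySetD (preOut ++ (t + (s + x)) :: pvTList xs (t + (s + x)) (s + x))
        (preA.length : Int)
        (PySem.Int.mod (t + (s + x) + ((preA.length : Int) + 1) * max m x) (10 ^ 9 + 7))
        = (preOut ++ [PySem.Int.mod (t + (s + x) + ((preA.length : Int) + 1) * max m x) (10 ^ 9 + 7)])
          ++ pvTList xs (t + (s + x)) (s + x) := by
      rw [PySem.List.pySetD_natCast, hlen]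
      simp
    rw [hset]
    have harr : preA ++ x :: xs = (preA ++ [x]) ++ xs := by simp
    have hrange : PySem.List.pyRange ((preA.length : Int) + 1) ((preA.length : Int) + ((x :: xs).length : Int)) 1
        = PySem.List.pyRange (((preA ++ [x]).length : Int)) (((preA ++ [x]).length : Int) + (xs.length : Int)) 1 := by
      congr 1 <;> (simp; try omega)
    rw [harr, hrange]
    rw [ih (preA ++ [x]) (preOut ++ [PySem.Int.mod (t + (s + x) + ((preA.length : Int) + 1) * max m x) (10 ^ 9 + 7)])
        (s + x) (t + (s + x)) (max m x) (by simp; try omega)]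
    simp only [pvTGo]
    simp

-- Abel's identity as the loop invariant: t = i*s - w turns the accumulator pass into B's closed-form pass
theorem pvTGo_eq_pvBGo (xs : List Int) : ∀ (i s t w m : Int), t = i * s - w →
    pvTGo xs i s t m = pvBGo xs i s w m := by
  induction xs with
  | nil => intro i s t w m _; rfl
  | cons x rest ih =>
    intro i s t w m hinv
    simp only [pvTGo, pvBGo]
    have hmax : max m x = if x > m then x else m := by
      by_cases h : x > m
      · simp [h, max_eq_right (le_of_lt h)]
      · simp [h, max_eq_left (not_lt.mp h)]
    have hval : t + (s + x) = (i + 1) * (s + x) - (w + i * x) := by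
      rw [hinv]; ring
    rw [hmax, hval]
    congr 1
    · congr 1
      generalize (if x > m then x else m) = y
      ring
    · exact ih (i + 1) (s + x) _ (w + i * x) _ rfl

-- ===== VERDICT (by name: the statement is the Claim_ definition above) =====
theorem getPrefixScores_spec : Claim_equal_getPrefixScores := by
  intro arr _
  unfold Spec_getPrefixScores getPrefixScores getPrefixScores_alt
  have h1 := pvALoop1_fst arr [] 0 0
  simp only [List.nil_append] at h1
  simp only [h1]
  -- combine: A's result = pvTGo = pvBGo
  calc pvALoop2 arr (PySem.List.pyRange 0 (arr.length : Int) 1) (pvTList arr 0 0) 0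
      = pvTGo arr 0 0 0 0 := by
        have := pvALoop2_key arr [] [] 0 0 0 rfl
        simpa using this
    _ = pvBGo arr 0 0 0 0 := pvTGo_eq_pvBGo arr 0 0 0 0 0 (by ring)
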